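-- pv_equiv track=rewrite | github.com/CaffeineLiqueur/MusicAgent | backend/app/services/chord.py | clamp_to_range
-- ===== SOURCE A (Python) =====
-- from typing import Dict, List, Optional, Sequence, Tuple
--
-- def clamp_to_range(notes: Sequence[int], bounds: Tuple[int, int]) -> List[int]:
--     if not notes:
--         return []
--     low, high = bounds
--     arr = list(notes)
--     # Try lifting if too low
--     while min(arr) < low:
--         arr = [n + 12 for n in arr]
--     while max(arr) > high:
--         arr = [n - 12 for n in arr]
--     return arr
-- ===== SOURCE B (Python) =====
-- def clamp_to_range(notes, bounds):
--     if not notes: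
--         return []
--     low, high = bounds
--     mn, mx = min(notes), max(notes)
--     up = max(0, (low - mn + 11) // 12)
--     down = max(0, (mx + 12 * up - high + 11) // 12)
--     off = 12 * (up - down)
--     return [n + off for n in notes]
-- ===== Notes on version B (the rewrite author's own statement) =====
-- stated objective: faster
-- what changed: Replaced the two repeated whole-list shift loops (re-scanning min/max and rebuilding the list once per octave) with a closed-form ceiling-division computation of the octave offset, applied to each note in a single pass.
import Mathlib
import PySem

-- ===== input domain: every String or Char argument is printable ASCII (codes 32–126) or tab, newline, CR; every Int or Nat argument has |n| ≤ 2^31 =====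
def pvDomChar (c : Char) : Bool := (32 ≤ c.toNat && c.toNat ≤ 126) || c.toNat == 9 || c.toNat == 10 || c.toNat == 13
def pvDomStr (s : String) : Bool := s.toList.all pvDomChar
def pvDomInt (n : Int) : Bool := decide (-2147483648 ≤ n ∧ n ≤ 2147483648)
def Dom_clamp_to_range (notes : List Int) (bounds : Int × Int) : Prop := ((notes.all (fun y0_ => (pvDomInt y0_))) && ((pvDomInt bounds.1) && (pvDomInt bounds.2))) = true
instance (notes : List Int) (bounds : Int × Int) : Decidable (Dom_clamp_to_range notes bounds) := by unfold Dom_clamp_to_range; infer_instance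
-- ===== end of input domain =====

-- B replaces A's repeated whole-list ±12 shift loops by a closed-form ceiling-division
-- octave offset applied in one pass (objective: faster).

-- ===== PORT A =====
-- needed by the ports' termination proofs (cited in decreasing_by), hence above the claim block
theorem pv_min?_map_add12 (arr : List Int) (m : Int)
    (h : PySem.List.min? arr (fun x => x) = some m) :
    PySem.List.min? (arr.map (fun n => n + 12)) (fun x => x) = some (m + 12) := by
  cases arr with
  | nil => simp [PySem.List.min?] at h
  | cons x t =>
    rw [PySem.List.min?_id_cons] at h
    have hfold : ∀ (t : List Int) (x : Int),
        (t.map (fun n => n + 12)).foldl min (x + 12) = t.foldl min x + 12 := by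
      intro t
      induction t with
      | nil => intro x; simp
      | cons y ys ih =>
        intro x
        simp only [List.map_cons, List.foldl_cons]
        rw [show min (x + 12) (y + 12) = min x y + 12 by omega, ih]
    simp only [List.map_cons, PySem.List.min?_id_cons, hfold, Option.some.injEq] at h ⊢
    omega

theorem pv_max?_map_sub12 (arr : List Int) (m : Int)
    (h : PySem.List.max? arr (fun x => x) = some m) :
    PySem.List.max? (arr.map (fun n => n - 12)) (fun x => x) = some (m - 12) := by
  cases arr with
  | nil => simp [PySem.List.max?] at h
  | cons x t =>
    rw [PySem.List.max?_id_cons] at h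
    have hfold : ∀ (t : List Int) (x : Int),
        (t.map (fun n => n - 12)).foldl max (x - 12) = t.foldl max x - 12 := by
      intro t
      induction t with
      | nil => intro x; simp
      | cons y ys ih =>
        intro x
        simp only [List.map_cons, List.foldl_cons]
        rw [show max (x - 12) (y - 12) = max x y - 12 by omega, ih]
    simp only [List.map_cons, PySem.List.max?_id_cons, hfold, Option.some.injEq] at h ⊢
    omega

-- A's first while loop: while min(arr) < low: arr = [n + 12 for n in arr]
def pvLiftLoop (low : Int) (arr : List Int) : List Int :=
  match h : PySem.List.min? arr (fun x => x) with
  | none => arr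
  | some m =>
    if _hm : m < low then pvLiftLoop low (arr.map (fun n => n + 12)) else arr
termination_by (low - (PySem.List.min? arr (fun x => x)).getD low).toNat
decreasing_by
  simp only [List.map_attach_eq_pmap, List.pmap_eq_map]
  rw [pv_min?_map_add12 arr m h, h]
  simp only [Option.getD_some]
  omega

-- A's second while loop: while max(arr) > high: arr = [n - 12 for n in arr]
def pvDropLoop (high : Int) (arr : List Int) : List Int :=
  match h : PySem.List.max? arr (fun x => x) with
  | none => arr
  | some m =>
    if _hm : high < m then pvDropLoop high (arr.map (fun n => n - 12)) else arr
termination_by ((PySem.List.max? arr (fun x => x)).getD high - high).toNat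
decreasing_by
  simp only [List.map_attach_eq_pmap, List.pmap_eq_map]
  rw [pv_max?_map_sub12 arr m h, h]
  simp only [Option.getD_some]
  omega

def clamp_to_range (notes : List Int) (bounds : Int × Int) : List Int :=
  if notes = [] then []
  else
    let low := bounds.1
    let high := bounds.2
    pvDropLoop high (pvLiftLoop low notes)

-- ===== PORT B =====
def clamp_to_range_alt (notes : List Int) (bounds : Int × Int) : List Int :=
  match notes with
  | [] => []
  | x :: t =>
    let low := bounds.1
    let high := bounds.2
    let mn := t.foldl min x          -- min(notes)
    let mx := t.foldl max x          -- max(notes)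
    let up := max 0 (PySem.Int.floordiv (low - mn + 11) 12)
    let down := max 0 (PySem.Int.floordiv (mx + 12 * up - high + 11) 12)
    let off := 12 * (up - down)
    (x :: t).map (fun n => n + off)

-- ===== PRECONDITION & SPEC =====
def Spec_clamp_to_range (notes : List Int) (bounds : Int × Int) (out : List Int) : Prop := out = clamp_to_range_alt notes bounds
instance (notes : List Int) (bounds : Int × Int) (out : List Int) : Decidable (Spec_clamp_to_range notes bounds out) := by unfold Spec_clamp_to_range; infer_instance

-- ===== CLAIM (what is proved, stated in full; the proofs are below) =====
def Claim_equal_clamp_to_range : Prop := ∀ (notes : List Int) (bounds : Int × Int), Dom_clamp_to_range notes bounds → Spec_clamp_to_range notes bounds (clamp_to_range notes bounds)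

-- ===== LEMMAS AND PROOFS =====

theorem pvLiftLoop_step (low : Int) (arr : List Int) (m : Int)
    (h : PySem.List.min? arr (fun x => x) = some m) (hlt : m < low) :
    pvLiftLoop low arr = pvLiftLoop low (arr.map (fun n => n + 12)) := by
  conv_lhs => rw [pvLiftLoop.eq_def]
  split
  · rename_i hn; rw [hn] at h; cases h
  · rename_i m' hm'; rw [hm'] at h; injection h with h; subst h; simp [hlt]

theorem pvLiftLoop_stop (low : Int) (arr : List Int) (m : Int)
    (h : PySem.List.min? arr (fun x => x) = some m) (hge : ¬ m < low) :
    pvLiftLoop low arr = arr := by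
  conv_lhs => rw [pvLiftLoop.eq_def]
  split
  · rfl
  · rename_i m' hm'; rw [hm'] at h; injection h with h; subst h; simp [hge]

theorem pvDropLoop_step (high : Int) (arr : List Int) (m : Int)
    (h : PySem.List.max? arr (fun x => x) = some m) (hlt : high < m) :
    pvDropLoop high arr = pvDropLoop high (arr.map (fun n => n - 12)) := by
  conv_lhs => rw [pvDropLoop.eq_def]
  split
  · rename_i hn; rw [hn] at h; cases h
  · rename_i m' hm'; rw [hm'] at h; injection h with h; subst h; simp [hlt]

theorem pvDropLoop_stop (high : Int) (arr : List Int) (m : Int)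
    (h : PySem.List.max? arr (fun x => x) = some m) (hge : ¬ high < m) :
    pvDropLoop high arr = arr := by
  conv_lhs => rw [pvDropLoop.eq_def]
  split
  · rfl
  · rename_i m' hm'; rw [hm'] at h; injection h with h; subst h; simp [hge]

-- max? commutes with adding a constant to every element
theorem pv_max?_map_add (c : Int) (arr : List Int) (m : Int)
    (h : PySem.List.max? arr (fun x => x) = some m) :
    PySem.List.max? (arr.map (fun n => n + c)) (fun x => x) = some (m + c) := by
  cases arr with
  | nil => simp [PySem.List.max?] at h
  | cons x t =>
    rw [PySem.List.max?_id_cons] at h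
    have hfold : ∀ (t : List Int) (x : Int),
        (t.map (fun n => n + c)).foldl max (x + c) = t.foldl max x + c := by
      intro t
      induction t with
      | nil => intro x; simp
      | cons y ys ih =>
        intro x
        simp only [List.map_cons, List.foldl_cons]
        rw [show max (x + c) (y + c) = max x y + c by omega, ih]
    simp only [List.map_cons, PySem.List.max?_id_cons, hfold, Option.some.injEq] at h ⊢
    omega

theorem pvLift_char (low : Int) (arr : List Int) (m : Int)
    (h : PySem.List.min? arr (fun x => x) = some m) :
    pvLiftLoop low arr
      = arr.map (fun n => n + 12 * max 0 (PySem.Int.floordiv (low - m + 11) 12)) := by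
  induction arr using pvLiftLoop.induct (low := low) generalizing m with
  | case1 arr hn => rw [hn] at h; cases h
  | case2 arr m' hm' hlt ih =>
    rw [hm'] at h; injection h with h; subst h
    rw [pvLiftLoop_step low arr m' hm' hlt]
    simp only [List.map_attach_eq_pmap, List.pmap_eq_map] at ih
    rw [ih (m' + 12) (pv_min?_map_add12 arr m' hm'), List.map_map]
    apply List.map_congr_left
    intro n _
    simp only [Function.comp_apply]
    rw [PySem.Int.floordiv_eq_ediv_of_pos (by omega), PySem.Int.floordiv_eq_ediv_of_pos (by omega)]
    omega
  | case3 arr m' hm' hge =>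
    rw [hm'] at h; injection h with h; subst h
    rw [pvLiftLoop_stop low arr m' hm' hge]
    have hz : max 0 (PySem.Int.floordiv (low - m' + 11) 12) = 0 := by
      rw [PySem.Int.floordiv_eq_ediv_of_pos (by omega)]; omega
    rw [hz]; simp

theorem pvDrop_char (high : Int) (arr : List Int) (m : Int)
    (h : PySem.List.max? arr (fun x => x) = some m) :
    pvDropLoop high arr
      = arr.map (fun n => n - 12 * max 0 (PySem.Int.floordiv (m - high + 11) 12)) := by
  induction arr using pvDropLoop.induct (high := high) generalizing m with
  | case1 arr hn => rw [hn] at h; cases h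
  | case2 arr m' hm' hlt ih =>
    rw [hm'] at h; injection h with h; subst h
    rw [pvDropLoop_step high arr m' hm' hlt]
    simp only [List.map_attach_eq_pmap, List.pmap_eq_map] at ih
    rw [ih (m' - 12) (pv_max?_map_sub12 arr m' hm'), List.map_map]
    apply List.map_congr_left
    intro n _
    simp only [Function.comp_apply]
    rw [PySem.Int.floordiv_eq_ediv_of_pos (by omega), PySem.Int.floordiv_eq_ediv_of_pos (by omega)]
    omega
  | case3 arr m' hm' hge =>
    rw [hm'] at h; injection h with h; subst h
    rw [pvDropLoop_stop high arr m' hm' hge]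
    have hz : max 0 (PySem.Int.floordiv (m' - high + 11) 12) = 0 := by
      rw [PySem.Int.floordiv_eq_ediv_of_pos (by omega)]; omega
    rw [hz]; simp

-- ===== VERDICT (by name: the statement is the Claim_ definition above) =====
theorem clamp_to_range_spec : Claim_equal_clamp_to_range := by
  intro notes bounds _
  unfold Spec_clamp_to_range clamp_to_range clamp_to_range_alt
  cases notes with
  | nil => simp
  | cons x t =>
    simp only [reduceCtorEq, if_false]
    rw [pvLift_char bounds.1 (x :: t) (t.foldl min x) (PySem.List.min?_id_cons x t)]
    rw [pvDrop_char bounds.2 _ (t.foldl max x + 12 * max 0 (PySem.Int.floordiv (bounds.1 - t.foldl min x + 11) 12))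
          (pv_max?_map_add _ (x :: t) (t.foldl max x) (PySem.List.max?_id_cons x t))]
    rw [List.map_map]
    apply List.map_congr_left
    intro n _
    simp only [Function.comp_apply]
    generalize max 0 (PySem.Int.floordiv (bounds.1 - t.foldl min x + 11) 12) = u
    generalize max 0 (PySem.Int.floordiv (t.foldl max x + 12 * u - bounds.2 + 11) 12) = d
    ring
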